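-- pv_equiv track=rewrite | github.com/automato-build/BIY | destiny/python_scripts/destiny.py | assign_vowels_to_number
-- ===== SOURCE A (Python) =====
-- destiny_char_map_list = ['ajs', 'bkt', 'clu', 'dmv', 'enw', 'fox', 'gpy', 'hqz', 'ir']
--
-- vowels = 'aeiou'
--
-- def assign_vowels_to_number(_word):
-- 	string = _word.casefold()
-- 	#
-- 	char = []
-- 	char_numbers = []
-- 	for char in string:
-- 		if char in vowels:
-- 			for destiny_chars in destiny_char_map_list:
-- 				if char in destiny_chars:
-- 					char_numbers.append(int(destiny_char_map_list.index(destiny_chars))+1)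
-- 	return char_numbers
-- ===== SOURCE B (Python) =====
-- def assign_vowels_to_number(_word):
--     return [(ord(c) - 97) % 9 + 1 for c in _word.casefold() if c in 'aeiou']
-- ===== Notes on version B (the rewrite author's own statement) =====
-- stated objective: simpler
-- what changed: Replaces the nested scan over the 9-entry letter table plus list.index with a single comprehension computing each vowel's destiny number by the closed form (ord(c)-97)%9+1.
import Mathlib
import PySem

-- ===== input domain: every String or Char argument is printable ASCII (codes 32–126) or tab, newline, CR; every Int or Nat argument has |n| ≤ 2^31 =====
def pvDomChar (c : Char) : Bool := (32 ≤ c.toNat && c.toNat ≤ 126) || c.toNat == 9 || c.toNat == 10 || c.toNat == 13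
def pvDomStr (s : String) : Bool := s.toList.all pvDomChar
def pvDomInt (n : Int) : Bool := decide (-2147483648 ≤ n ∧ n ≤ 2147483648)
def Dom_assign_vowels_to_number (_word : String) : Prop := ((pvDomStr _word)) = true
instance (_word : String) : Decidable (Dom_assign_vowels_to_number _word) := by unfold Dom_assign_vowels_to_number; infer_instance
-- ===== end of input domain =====

-- B replaces A's nested scan of the 9-entry letter table (with list.index) by the
-- closed form (ord(c)-97)%9+1 for each vowel, in one comprehension: simpler.

-- ===== PORT A =====
def destiny_char_map_list : List String := ["ajs", "bkt", "clu", "dmv", "enw", "fox", "gpy", "hqz", "ir"]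

def assign_vowels_to_number (_word : String) : List Int :=
  let string := PySem.Str.lower _word   -- casefold = lower on the ASCII domain
  string.toList.foldl (fun char_numbers char =>
    if char ∈ "aeiou".toList then
      destiny_char_map_list.foldl (fun acc destiny_chars =>
        if char ∈ destiny_chars.toList then
          acc ++ [(((PySem.List.index? destiny_char_map_list destiny_chars).getD 0 : Nat) : Int) + 1]
        else acc) char_numbers
    else char_numbers) []

-- ===== PORT B =====
def assign_vowels_to_number_alt (_word : String) : List Int :=
  (PySem.Str.lower _word).toList.filterMap (fun c =>
    if c ∈ "aeiou".toList then some (PySem.Int.mod ((c.toNat : Int) - 97) 9 + 1) else none)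

-- ===== PRECONDITION & SPEC =====
def Spec_assign_vowels_to_number (_word : String) (out : List Int) : Prop := out = assign_vowels_to_number_alt _word
instance (_word : String) (out : List Int) : Decidable (Spec_assign_vowels_to_number _word out) := by unfold Spec_assign_vowels_to_number; infer_instance

-- ===== CLAIM (what is proved, stated in full; the proofs are below) =====
def Claim_equal_assign_vowels_to_number : Prop := ∀ (_word : String), Dom_assign_vowels_to_number _word → Spec_assign_vowels_to_number _word (assign_vowels_to_number _word)

-- ===== LEMMAS AND PROOFS =====

-- per-character contribution of B
def pvB (c : Char) : Option Int :=
  if c ∈ "aeiou".toList then some (PySem.Int.mod ((c.toNat : Int) - 97) 9 + 1) else none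

-- per-character step of A
def pvA (acc : List Int) (c : Char) : List Int :=
  if c ∈ "aeiou".toList then
    destiny_char_map_list.foldl (fun a dc =>
      if c ∈ dc.toList then
        a ++ [(((PySem.List.index? destiny_char_map_list dc).getD 0 : Nat) : Int) + 1]
      else a) acc
  else acc

theorem pvA_step (acc : List Int) (c : Char) : pvA acc c = acc ++ (pvB c).toList := by
  by_cases hv : c ∈ "aeiou".toList
  · have hv' : c ∈ ['a', 'e', 'i', 'o', 'u'] := hv
    fin_cases hv' <;> simp [pvA, pvB, destiny_char_map_list, PySem.Int.mod] <;> decide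
  · have hv' : ¬(c = 'a' ∨ c = 'e' ∨ c = 'i' ∨ c = 'o' ∨ c = 'u') := by simpa using hv
    simp [pvA, pvB, hv']

theorem pvA_foldl (l : List Char) (acc : List Int) :
    l.foldl pvA acc = acc ++ l.filterMap pvB := by
  induction l generalizing acc with
  | nil => simp
  | cons c t ih =>
    simp only [List.foldl_cons, List.filterMap_cons]
    rw [ih, pvA_step]
    cases h : pvB c <;> simp

-- ===== VERDICT (by name: the statement is the Claim_ definition above) =====
theorem assign_vowels_to_number_spec : Claim_equal_assign_vowels_to_number := by
  intro w _
  show assign_vowels_to_number w = assign_vowels_to_number_alt w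
  have h := pvA_foldl (PySem.Str.lower w).toList []
  simp only [List.nil_append] at h
  exact h
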